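-- pv_equiv track=rewrite | github.com/carlosvalgar/Apuntes | CFGS Desarrollo de Aplicaciones Web/M03_Programación/UF2/Recursividad/recursividadEjercicios.py | numeroIndex
-- ===== SOURCE A (Python) =====
-- def numeroIndex(llista):
--     if len(llista) == 1:
--         if llista[-1] == llista.index(llista[-1]):
--             return True
--         else:
--             return False
--     if numeroIndex(llista[:-1]) == False:
--         if llista[-1] == llista.index(llista[-1]):
--             return True
--         else:
--             return False
--     elif numeroIndex(llista[:-1]) == True:
--         return True
-- ===== SOURCE B (Python) =====
-- def numeroIndex(llista):
--     for i in range(len(llista)):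
--         if llista[i] == llista.index(llista[i]):
--             return True
--     return False
-- ===== Notes on version B (the rewrite author's own statement) =====
-- stated objective: simpler
-- what changed: Replaces right-to-left recursion peeling the last element (re-slicing and re-calling, twice per level when the prefix matched) with a single forward for-loop over indices that returns True on the first element equal to its first-occurrence index.
import Mathlib
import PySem

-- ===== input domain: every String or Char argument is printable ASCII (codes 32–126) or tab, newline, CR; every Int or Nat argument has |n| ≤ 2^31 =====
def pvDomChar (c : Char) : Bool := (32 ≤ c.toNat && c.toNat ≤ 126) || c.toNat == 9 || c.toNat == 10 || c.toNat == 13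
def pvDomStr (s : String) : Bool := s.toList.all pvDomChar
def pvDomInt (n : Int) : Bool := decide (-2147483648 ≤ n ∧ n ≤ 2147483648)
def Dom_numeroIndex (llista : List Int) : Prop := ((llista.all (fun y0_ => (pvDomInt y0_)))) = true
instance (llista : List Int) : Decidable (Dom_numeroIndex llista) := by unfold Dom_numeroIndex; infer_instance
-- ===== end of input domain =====

-- B replaces A's last-element recursion by a single forward index loop (simpler); A raises on [] (excluded by Pre_).

-- ===== PORT A =====
-- llista[-1] == llista.index(llista[-1])
def pvLastCheck (llista : List Int) : Bool :=
  match PySem.List.pyGet? llista (-1) with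
  | some v =>
      match PySem.List.index? llista v with
      | some j => v == (j : Int)
      | none => false
  | none => false

def numeroIndex (llista : List Int) : Bool :=
  if h1 : llista.length == 1 then
    (if pvLastCheck llista then true else false)
  else if h0 : llista.length == 0 then
    false  -- totality guard: Python recurses forever on [] (outside Pre_)
  else if numeroIndex (PySem.List.slice llista none (some (-1))) = false then
    (if pvLastCheck llista then true else false)
  else true
termination_by llista.length
decreasing_by
  simp only [PySem.List.slice_to_neg_one, List.length_dropLast]
  simp only [beq_iff_eq] at h1 h0
  omega

-- ===== PORT B =====
-- llista[i] == llista.index(llista[i]) for the forward loop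
def pvIdxCheck (llista : List Int) (i : Int) : Bool :=
  match PySem.List.pyGet? llista i with
  | some v =>
      match PySem.List.index? llista v with
      | some j => v == (j : Int)
      | none => false
  | none => false

def numeroIndex_alt (llista : List Int) : Bool :=
  (PySem.List.pyRange 0 llista.length 1).any (fun i => pvIdxCheck llista i)

-- ===== PRECONDITION & SPEC =====
-- Pre_ excludes only the empty list, on which A raises RecursionError.
def Pre_numeroIndex (llista : List Int) : Prop := llista ≠ []
instance (llista : List Int) : Decidable (Pre_numeroIndex llista) := by unfold Pre_numeroIndex; infer_instance
def pvWitness_numeroIndex : List Int := ([0, 3, 1])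

def Spec_numeroIndex (llista : List Int) (out : Bool) : Prop := out = numeroIndex_alt llista
instance (llista : List Int) (out : Bool) : Decidable (Spec_numeroIndex llista out) := by unfold Spec_numeroIndex; infer_instance

-- ===== CLAIM (what is proved, stated in full; the proofs are below) =====
def Claim_equal_numeroIndex : Prop := ∀ (llista : List Int), Dom_numeroIndex llista → Pre_numeroIndex llista → Spec_numeroIndex llista (numeroIndex llista)

-- ===== LEMMAS AND PROOFS =====

lemma pvIdxCheck_append (xs : List Int) (x : Int) (i : Int) (h0 : 0 ≤ i) (hi : i < xs.length) :
    pvIdxCheck (xs ++ [x]) i = pvIdxCheck xs i := by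
  obtain ⟨n, rfl⟩ := Int.eq_ofNat_of_zero_le h0
  have hn : n < xs.length := by exact_mod_cast hi
  unfold pvIdxCheck
  rw [PySem.List.pyGet?_natCast, PySem.List.pyGet?_natCast,
    List.getElem?_append_left hn, List.getElem?_eq_getElem hn]
  dsimp only
  rw [PySem.List.index?_append_of_mem [x] (List.getElem_mem hn)]

lemma pvIdxCheck_last (xs : List Int) (x : Int) :
    pvIdxCheck (xs ++ [x]) (xs.length : Int) = pvLastCheck (xs ++ [x]) := by
  unfold pvIdxCheck pvLastCheck
  rw [PySem.List.pyGet?_neg_one_append_singleton, PySem.List.pyGet?_natCast,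
    List.getElem?_concat_length]

lemma any_ext (l : List Int) (f g : Int → Bool) (h : ∀ i ∈ l, f i = g i) :
    l.any f = l.any g := by
  induction l with
  | nil => rfl
  | cons a t ih =>
      simp only [List.any_cons, h a (List.mem_cons_self), ih (fun i hi => h i (List.mem_cons_of_mem a hi))]

lemma alt_append (xs : List Int) (x : Int) :
    numeroIndex_alt (xs ++ [x]) = (numeroIndex_alt xs || pvLastCheck (xs ++ [x])) := by
  unfold numeroIndex_alt
  have hlen : ((xs ++ [x]).length : Int) = (xs.length : Int) + 1 := by
    simp
  rw [hlen, PySem.List.pyRange_one_succ_right (by omega : (0:Int) ≤ (xs.length : Int)),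
    List.any_append]
  rw [any_ext (PySem.List.pyRange 0 (xs.length : Int) 1) _ (fun i => pvIdxCheck xs i)
    (fun i hi => by
      rw [PySem.List.mem_pyRange_one] at hi
      exact pvIdxCheck_append xs x i hi.1 hi.2)]
  simp [pvIdxCheck_last]

lemma A_append (xs : List Int) (x : Int) (hxs : xs ≠ []) :
    numeroIndex (xs ++ [x]) = (numeroIndex xs || pvLastCheck (xs ++ [x])) := by
  have hlen : xs.length ≠ 0 := by simpa using hxs
  rw [numeroIndex]
  simp only [List.length_append, List.length_singleton]
  rw [dif_neg (by simpa using hlen), dif_neg (by simp)]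
  rw [PySem.List.slice_to_neg_one, List.dropLast_concat]
  by_cases hA : numeroIndex xs = false
  · rw [if_pos hA, hA, Bool.false_or]
    by_cases hc : pvLastCheck (xs ++ [x]) <;> simp [hc]
  · rw [if_neg hA]
    simp only [Bool.not_eq_false] at hA
    rw [hA, Bool.true_or]

lemma single_eq (x : Int) : numeroIndex [x] = numeroIndex_alt [x] := by
  rw [numeroIndex]
  have h1 : numeroIndex_alt [x] = pvLastCheck [x] := by
    unfold numeroIndex_alt
    rw [show ((([x] : List Int).length : Int)) = 0 + 1 by simp]
    rw [PySem.List.pyRange_one_singleton]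
    simpa using pvIdxCheck_last [] x
  simp only [List.length_singleton]
  rw [dif_pos (by simp)]
  by_cases hc : pvLastCheck [x] <;> simp [hc, h1]

lemma main_eq (llista : List Int) (h : llista ≠ []) : numeroIndex llista = numeroIndex_alt llista := by
  induction llista using List.reverseRecOn with
  | nil => exact absurd rfl h
  | append_singleton xs x ih =>
      rcases eq_or_ne xs [] with rfl | hxs
      · simpa using single_eq x
      · rw [A_append xs x hxs, alt_append xs x, ih hxs]

-- ===== VERDICT (by name: the statement is the Claim_ definition above) =====
theorem numeroIndex_spec : Claim_equal_numeroIndex := by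
  intro l _ hpre
  unfold Spec_numeroIndex
  exact main_eq l hpre
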